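-- pv_equiv track=rewrite | github.com/1119xkwks/rag_ai | 03_PROG/BE/rag_ai/rag_ai/ingestion/chunker.py | chunk_markdown_by_delimiter
-- ===== SOURCE A (Python) =====
-- from typing import List
--
-- def chunk_markdown_by_delimiter(markdown_text: str, delimiter: str = "###") -> List[str]:
--     """
--     지정된 헤더 구분 기호(예: '###', '@@@')를 기준으로 마크다운 텍스트를 청크로 분리합니다.
--
--     동작 방식:
--     - 각 '<delimiter> 제목' + 그 아래 본문을 하나의 청크로 묶음
--     - 헤더가 전혀 없으면 빈 리스트 반환 (호출 측에서 fallback 가능)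
--     """
--     if not markdown_text or not markdown_text.strip():
--         return []
--     normalized_delimiter = (delimiter or "###").strip() or "###"
--
--     lines = markdown_text.splitlines()
--     chunks: List[str] = []
--     current: List[str] = []
--
--     for line in lines:
--         if line.strip().startswith(normalized_delimiter):
--             # 새 헤더를 만나면 기존 블록을 청크로 확정
--             if current:
--                 block = "\n".join(current).strip()
--                 if block:
--                     chunks.append(block)
--                 current = []
--         current.append(line)
--
--     # 마지막 블록 처리
--     if current:
--         block = "\n".join(current).strip()
--         if block:
--             chunks.append(block)
--
--     # 구분 기호 헤더가 아예 없는 경우를 감지해 빈 리스트 반환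
--     has_delimiter_header = any(
--         any(line.lstrip().startswith(normalized_delimiter) for line in chunk.splitlines())
--         for chunk in chunks
--     )
--     return chunks if has_delimiter_header else []
-- ===== SOURCE B (Python) =====
-- from typing import List
--
-- def chunk_markdown_by_delimiter(markdown_text: str, delimiter: str = "###") -> List[str]:
--     # Two-pass re-implementation: collect header line indices first, then slice
--     # the line list at those boundaries into chunks.
--     if not markdown_text or not markdown_text.strip():
--         return []
--     normalized_delimiter = (delimiter or "###").strip() or "###"
--
--     lines = markdown_text.splitlines()
--     header_idxs = [i for i, line in enumerate(lines)
--                    if line.strip().startswith(normalized_delimiter)]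
--     if not header_idxs:
--         return []
--
--     bounds = [0] + header_idxs + [len(lines)]
--     chunks: List[str] = []
--     for start, end in zip(bounds, bounds[1:]):
--         block = "\n".join(lines[start:end]).strip()
--         if block:
--             chunks.append(block)
--     return chunks
-- ===== Notes on version B (the rewrite author's own statement) =====
-- stated objective: alternative
-- what changed: Replaces A's single stateful pass (accumulator flushed at each header plus a post-pass any-of-any rescan of the produced chunks to decide the no-header case) by a two-pass index decomposition: collect the header line indices, return [] if there are none, then slice the line list at those boundaries and join/strip each slice.
import Mathlib
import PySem

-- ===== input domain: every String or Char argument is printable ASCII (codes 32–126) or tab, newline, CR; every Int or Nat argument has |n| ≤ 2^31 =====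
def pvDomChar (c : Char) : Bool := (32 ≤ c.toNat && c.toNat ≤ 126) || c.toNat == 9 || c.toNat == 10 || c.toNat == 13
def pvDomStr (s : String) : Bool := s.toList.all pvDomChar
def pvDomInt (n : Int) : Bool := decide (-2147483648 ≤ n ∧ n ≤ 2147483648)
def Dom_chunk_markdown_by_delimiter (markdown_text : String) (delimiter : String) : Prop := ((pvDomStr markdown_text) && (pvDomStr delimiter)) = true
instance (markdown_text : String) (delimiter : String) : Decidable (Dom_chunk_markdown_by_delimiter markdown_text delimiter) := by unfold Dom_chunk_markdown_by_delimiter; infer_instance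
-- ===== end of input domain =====

-- B changes the decomposition: instead of one stateful pass that flushes an accumulator and a
-- post-pass re-scan of the produced chunks for a header, B collects header line indices first and
-- then slices the line list at those boundaries (objective: alternative decomposition).

-- ===== PORT A =====
-- the flush block Python A repeats twice ("if current: block = ...; if block: chunks.append(block)")
def pvFlushA (chunks current : List String) : List String :=
  if current ≠ [] then
    let block := PySem.Str.strip (PySem.Str.join "\n" current)
    if block ≠ "" then chunks ++ [block] else chunks
  else chunks

-- the loop body of Python A (state = (chunks, current))
def pvStepA (nd : String) (st : List String × List String) (line : String) : List String × List String :=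
  if PySem.Str.startswith (PySem.Str.strip line) nd then (pvFlushA st.1 st.2, [line])
  else (st.1, st.2 ++ [line])

def chunk_markdown_by_delimiter (markdown_text : String) (delimiter : String) : List String :=
  if markdown_text = "" ∨ PySem.Str.strip markdown_text = "" then []
  else
    let nd1 := PySem.Str.strip (if delimiter = "" then "###" else delimiter)
    let normalized_delimiter := if nd1 = "" then "###" else nd1
    let lines := PySem.Str.splitlines markdown_text
    let st := lines.foldl (pvStepA normalized_delimiter) ([], [])
    let chunks := pvFlushA st.1 st.2
    let has_delimiter_header := chunks.any fun chunk =>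
      (PySem.Str.splitlines chunk).any fun line =>
        PySem.Str.startswith (PySem.Str.lstrip line) normalized_delimiter
    if has_delimiter_header then chunks else []

-- ===== PORT B =====
def chunk_markdown_by_delimiter_alt (markdown_text : String) (delimiter : String) : List String :=
  if markdown_text = "" ∨ PySem.Str.strip markdown_text = "" then []
  else
    let nd1 := PySem.Str.strip (if delimiter = "" then "###" else delimiter)
    let normalized_delimiter := if nd1 = "" then "###" else nd1
    let lines := PySem.Str.splitlines markdown_text
    let header_idxs := (PySem.List.enumerate lines).filterMap fun il =>
      if PySem.Str.startswith (PySem.Str.strip il.2) normalized_delimiter then some il.1 else none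
    if header_idxs = [] then []
    else
      let bounds : List Int := 0 :: header_idxs ++ [(lines.length : Int)]
      (bounds.zip bounds.tail).foldl (fun chunks se =>
        let block := PySem.Str.strip (PySem.Str.join "\n"
          (PySem.List.slice lines (some se.1) (some se.2)))
        if block ≠ "" then chunks ++ [block] else chunks) []

-- ===== PRECONDITION & SPEC =====
def Spec_chunk_markdown_by_delimiter (markdown_text : String) (delimiter : String) (out : List String) : Prop := out = chunk_markdown_by_delimiter_alt markdown_text delimiter
instance (markdown_text : String) (delimiter : String) (out : List String) : Decidable (Spec_chunk_markdown_by_delimiter markdown_text delimiter out) := by unfold Spec_chunk_markdown_by_delimiter; infer_instance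

-- ===== CLAIM (what is proved, stated in full; the proofs are below) =====
def Claim_equal_chunk_markdown_by_delimiter : Prop := ∀ (markdown_text : String) (delimiter : String), Dom_chunk_markdown_by_delimiter markdown_text delimiter → Spec_chunk_markdown_by_delimiter markdown_text delimiter (chunk_markdown_by_delimiter markdown_text delimiter)

-- ===== LEMMAS AND PROOFS =====

-- ---------- chars-level reference for splitlines ----------

-- the break-character test used inside PySem.Chars.splitlines (definitionally equal to it)
def pvIsB (c : Char) : Bool :=
  have n := c.toNat
  decide (n = 10) || decide (n = 13) || decide (n = 11) || decide (n = 12) || decide (n = 28) ||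
      decide (n = 29) || decide (n = 30) || decide (n = 133) || decide (n = 8232) || decide (n = 8233)

-- structural reference version of Python's str.splitlines
def pvSLc : List Char → List (List Char)
  | [] => []
  | '\r' :: '\n' :: r => [] :: pvSLc r
  | c :: r =>
    if pvIsB c then [] :: pvSLc r
    else match pvSLc r with
      | [] => [[c]]
      | l :: ls => (c :: l) :: ls

def pvPrep (p : List Char) : List (List Char) → List (List Char)
  | [] => if p = [] then [] else [p]
  | l :: ls => (p ++ l) :: ls

lemma pvSLc_cons (c : Char) (r : List Char) (hpair : ¬(c = '\r' ∧ r.head? = some '\n')) :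
    pvSLc (c :: r) = if pvIsB c then [] :: pvSLc r else
      match pvSLc r with
      | [] => [[c]]
      | l :: ls => (c :: l) :: ls := by
  rw [pvSLc.eq_def]
  split
  · rename_i heq; cases heq
  · rename_i heq
    injection heq with h1 h2
    exact absurd ⟨h1, by rw [h2]; rfl⟩ hpair
  · rename_i heq
    injection heq with h1 h2
    subst h1; subst h2; rfl

lemma pv_not_pair (c : Char) (r : List Char)
    (hpair : ∀ (r1 : List Char), c = '\r' → r = '\n' :: r1 → False) :
    ¬(c = '\r' ∧ r.head? = some '\n') := by
  rintro ⟨h1, h2⟩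
  cases r with
  | nil => simp at h2
  | cons a t =>
    simp at h2
    exact hpair t h1 (by rw [h2])

lemma pv_go_spec : ∀ (s cur : List Char) (acc : List (List Char)),
    PySem.Chars.splitlines.go pvIsB s cur acc = acc.reverse ++ pvPrep cur.reverse (pvSLc s) := by
  intro s
  induction s using pvSLc.induct with
  | case1 =>
    intro cur acc
    rw [PySem.Chars.splitlines.go]
    by_cases h : cur = []
    · simp [h, pvSLc, pvPrep]
    · simp [h, pvSLc, pvPrep, List.isEmpty_iff]
  | case2 r ih =>
    intro cur acc
    rw [PySem.Chars.splitlines.go, ih]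
    simp [pvSLc]
    cases pvSLc r <;> simp [pvPrep]
  | case3 c r hpair hB ih =>
    intro cur acc
    rw [PySem.Chars.splitlines.go]
    · rw [if_pos hB, ih, pvSLc_cons c r (pv_not_pair c r hpair), if_pos hB]
      cases pvSLc r <;> simp [pvPrep]
    · exact hpair
  | case4 c r hpair hB hnil ih =>
    intro cur acc
    rw [PySem.Chars.splitlines.go]
    · rw [if_neg (by simp [hB]), ih, pvSLc_cons c r (pv_not_pair c r hpair),
        if_neg (by simp [hB]), hnil]
      simp [pvPrep]
    · exact hpair
  | case5 c r hpair hB l ls heq ih =>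
    intro cur acc
    rw [PySem.Chars.splitlines.go]
    · rw [if_neg (by simp [hB]), ih, pvSLc_cons c r (pv_not_pair c r hpair),
        if_neg (by simp [hB]), heq]
      simp [pvPrep]
    · exact hpair

lemma pv_splitlines_eq (s : List Char) : PySem.Chars.splitlines s = pvSLc s := by
  show PySem.Chars.splitlines.go pvIsB s [] [] = pvSLc s
  rw [pv_go_spec]
  cases pvSLc s <;> simp [pvPrep]

lemma pv_SLc_breakfree : ∀ (s : List Char), ∀ l ∈ pvSLc s, ∀ c ∈ l, pvIsB c = false := by
  intro s
  induction s using pvSLc.induct with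
  | case1 => simp [pvSLc]
  | case2 r ih =>
    intro l hl c hc
    rw [show pvSLc ('\r' :: '\n' :: r) = [] :: pvSLc r from rfl] at hl
    rcases List.mem_cons.mp hl with h | h
    · subst h; simp at hc
    · exact ih l h c hc
  | case3 c r hpair hB ih =>
    intro l hl ch hch
    rw [pvSLc_cons c r (pv_not_pair c r hpair), if_pos hB] at hl
    rcases List.mem_cons.mp hl with h | h
    · subst h; simp at hch
    · exact ih l h ch hch
  | case4 c r hpair hB hnil ih =>
    intro l hl ch hch
    rw [pvSLc_cons c r (pv_not_pair c r hpair), if_neg (by simp [hB]), hnil] at hl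
    simp at hl
    subst hl
    rcases List.mem_singleton.mp hch with h
    subst h
    simpa using hB
  | case5 c r hpair hB l0 ls heq ih =>
    intro l hl ch hch
    rw [pvSLc_cons c r (pv_not_pair c r hpair), if_neg (by simp [hB]), heq] at hl
    rcases List.mem_cons.mp hl with h | h
    · subst h
      rcases List.mem_cons.mp hch with h2 | h2
      · subst h2; simpa using hB
      · exact ih l0 (heq ▸ List.mem_cons_self ..) ch h2
    · exact ih l (heq ▸ List.mem_cons_of_mem _ h) ch hch

-- ---------- the header-prefix predicate q and whitespace lemmas ----------

def pvQ (dc l : List Char) : Bool := PySem.Chars.startswith (PySem.Chars.lstrip l) dc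

lemma pv_dropWhile_idem (p : Char → Bool) (l : List Char) :
    List.dropWhile p (List.dropWhile p l) = List.dropWhile p l := by
  rw [List.dropWhile_eq_self_iff]
  intro hl
  have hne : List.dropWhile p l ≠ [] := by
    intro h; rw [h] at hl; simp at hl
  have h2 := List.head_dropWhile_not p hne
  rw [List.head_eq_getElem] at h2
  simp [h2]

lemma pv_prefix_ws (dc x ws : List Char) (hne : dc ≠ [])
    (hlast : ∀ c, dc.getLast? = some c → PySem.Chars.isspace c = false)
    (hws : ∀ c ∈ ws, PySem.Chars.isspace c = true) :
    dc <+: (x ++ ws) ↔ dc <+: x := by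
  constructor
  · intro h
    by_cases hlen : dc.length ≤ x.length
    · exact List.prefix_of_prefix_length_le h (List.prefix_append x ws) hlen
    · exfalso
      rw [not_le] at hlen
      obtain ⟨c, hc⟩ := Option.isSome_iff_exists.mp (List.getLast?_isSome.mpr hne)
      have hdx : dc.length ≤ (x ++ ws).length := h.length_le
      rw [List.length_append] at hdx
      have hpos : 0 < dc.length := by
        cases dc with
        | nil => exact absurd rfl hne
        | cons a t => simp
      have hidx : dc.length - 1 < dc.length := by omega
      have hc' : dc[dc.length - 1] = c := by
        rw [List.getLast?_eq_getElem?] at hc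
        simpa [List.getElem?_eq_getElem hidx] using hc
      have he : dc[dc.length - 1]'hidx =
          (x ++ ws)[dc.length - 1]'(by rw [List.length_append]; omega) := h.getElem hidx
      rw [List.getElem_append_right (by omega)] at he
      have hlt : dc.length - 1 - x.length < ws.length := by omega
      have he2 : c = ws[dc.length - 1 - x.length] := by rw [← hc', he]
      have hmem : c ∈ ws := he2 ▸ List.getElem_mem hlt
      have h1 := hws c hmem
      have h2 := hlast c hc
      rw [h1] at h2
      exact Bool.noConfusion h2
  · intro h
    exact h.trans (List.prefix_append x ws)

lemma pv_startswith_append_ws (dc x ws : List Char) (hne : dc ≠ [])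
    (hlast : ∀ c, dc.getLast? = some c → PySem.Chars.isspace c = false)
    (hws : ∀ c ∈ ws, PySem.Chars.isspace c = true) :
    PySem.Chars.startswith (x ++ ws) dc = PySem.Chars.startswith x dc := by
  rw [Bool.eq_iff_iff, PySem.Chars.startswith_iff, PySem.Chars.startswith_iff]
  exact pv_prefix_ws dc x ws hne hlast hws

lemma pv_rstrip_decomp (x : List Char) :
    ∃ ws, x = PySem.Chars.rstrip x ++ ws ∧ ∀ c ∈ ws, PySem.Chars.isspace c = true := by
  refine ⟨(List.takeWhile PySem.Chars.isspace x.reverse).reverse, ?_, ?_⟩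
  · show x = (List.dropWhile PySem.Chars.isspace x.reverse).reverse ++
      (List.takeWhile PySem.Chars.isspace x.reverse).reverse
    rw [← List.reverse_append, List.takeWhile_append_dropWhile, List.reverse_reverse]
  · intro c hcm
    rw [List.mem_reverse] at hcm
    exact List.mem_takeWhile_imp hcm

lemma pv_rstrip_nil_iff (x : List Char) :
    PySem.Chars.rstrip x = [] ↔ ∀ c ∈ x, PySem.Chars.isspace c = true := by
  simp [PySem.Chars.rstrip, List.reverse_eq_nil_iff, List.dropWhile_eq_nil_iff,
    List.mem_reverse]

lemma pv_rstrip_append (x y : List Char) :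
    PySem.Chars.rstrip (x ++ y) =
      if PySem.Chars.rstrip y = [] then PySem.Chars.rstrip x else x ++ PySem.Chars.rstrip y := by
  show (List.dropWhile PySem.Chars.isspace (x ++ y).reverse).reverse = _
  rw [List.reverse_append, List.dropWhile_append]
  by_cases h : List.dropWhile PySem.Chars.isspace y.reverse = []
  · rw [if_pos (by simp [h]), if_pos (by simp [PySem.Chars.rstrip, h])]
    rfl
  · rw [if_neg (by simp [h]), if_neg (by simp [PySem.Chars.rstrip, h])]
    rw [List.reverse_append, List.reverse_reverse]
    rfl

lemma pv_q_nil (dc : List Char) (hne : dc ≠ []) : pvQ dc [] = false := by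
  cases dc with
  | nil => exact absurd rfl hne
  | cons a t => simp [pvQ, PySem.Chars.lstrip, PySem.Chars.startswith]

lemma pv_q_ws (dc l : List Char) (hne : dc ≠ [])
    (hl : ∀ c ∈ l, PySem.Chars.isspace c = true) : pvQ dc l = false := by
  have h0 : PySem.Chars.lstrip l = [] := by
    rw [PySem.Chars.lstrip, List.dropWhile_eq_nil_iff]
    exact hl
  cases dc with
  | nil => exact absurd rfl hne
  | cons a t => simp [pvQ, h0, PySem.Chars.startswith]

lemma pv_q_append_ws (dc x ws : List Char) (hne : dc ≠ [])
    (hlast : ∀ c, dc.getLast? = some c → PySem.Chars.isspace c = false)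
    (hws : ∀ c ∈ ws, PySem.Chars.isspace c = true) :
    pvQ dc (x ++ ws) = pvQ dc x := by
  show PySem.Chars.startswith (List.dropWhile PySem.Chars.isspace (x ++ ws)) dc = _
  rw [List.dropWhile_append]
  by_cases h : List.dropWhile PySem.Chars.isspace x = []
  · rw [if_pos (by simp [h])]
    have h2 : List.dropWhile PySem.Chars.isspace ws = [] := by
      rw [List.dropWhile_eq_nil_iff]; exact hws
    show _ = PySem.Chars.startswith (List.dropWhile PySem.Chars.isspace x) dc
    rw [h2, h]
  · rw [if_neg (by simp [h])]
    exact pv_startswith_append_ws dc _ ws hne hlast hws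

lemma pv_q_lstrip (dc l : List Char) : pvQ dc (PySem.Chars.lstrip l) = pvQ dc l := by
  show PySem.Chars.startswith
      (List.dropWhile PySem.Chars.isspace (List.dropWhile PySem.Chars.isspace l)) dc = _
  rw [pv_dropWhile_idem]
  rfl

lemma pv_q_rstrip (dc l : List Char) (hne : dc ≠ [])
    (hlast : ∀ c, dc.getLast? = some c → PySem.Chars.isspace c = false) :
    pvQ dc (PySem.Chars.rstrip l) = pvQ dc l := by
  obtain ⟨ws, hdecomp, hws⟩ := pv_rstrip_decomp l
  conv_rhs => rw [hdecomp]
  rw [pv_q_append_ws dc _ ws hne hlast hws]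

lemma pv_strip_q (dc l : List Char) (hne : dc ≠ [])
    (hlast : ∀ c, dc.getLast? = some c → PySem.Chars.isspace c = false) :
    PySem.Chars.startswith (PySem.Chars.strip l) dc = pvQ dc l := by
  show PySem.Chars.startswith (PySem.Chars.rstrip (PySem.Chars.lstrip l)) dc = _
  obtain ⟨ws, hdecomp, hws⟩ := pv_rstrip_decomp (PySem.Chars.lstrip l)
  show _ = PySem.Chars.startswith (PySem.Chars.lstrip l) dc
  conv_rhs => rw [hdecomp]
  rw [pv_startswith_append_ws dc _ ws hne hlast hws]

lemma pv_startswith_nil (dc : List Char) (hne : dc ≠ []) :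
    PySem.Chars.startswith [] dc = false := by
  cases dc with
  | nil => exact absurd rfl hne
  | cons a t => rfl

-- ---------- strip commutes with "\n"-join at the line level ----------

def pvTrimL : List (List Char) → List (List Char)
  | [] => []
  | l :: rest => if PySem.Chars.lstrip l = [] then pvTrimL rest else PySem.Chars.lstrip l :: rest

def pvTrimR : List (List Char) → List (List Char)
  | [] => []
  | l :: rest =>
    match pvTrimR rest with
    | [] => if PySem.Chars.rstrip l = [] then [] else [PySem.Chars.rstrip l]
    | r :: rs => l :: r :: rs

lemma pv_trimR_single : ∀ (g : List (List Char)) (r : List Char), pvTrimR g = [r] → r ≠ [] := by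
  intro g
  induction g with
  | nil => intro r h; simp [pvTrimR] at h
  | cons l rest ih =>
    intro r h
    rw [pvTrimR] at h
    cases htr : pvTrimR rest with
    | nil =>
      rw [htr] at h
      by_cases h2 : PySem.Chars.rstrip l = []
      · simp [h2] at h
      · simp [h2] at h
        rw [← h]
        exact h2
    | cons a b =>
      rw [htr] at h
      simp at h

lemma pv_lstrip_join (g : List (List Char)) :
    PySem.Chars.lstrip (PySem.Chars.join ['\n'] g) = PySem.Chars.join ['\n'] (pvTrimL g) := by
  induction g with
  | nil => simp [PySem.Chars.join_nil, pvTrimL, PySem.Chars.lstrip]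
  | cons l rest ih =>
    cases rest with
    | nil =>
      rw [PySem.Chars.join_singleton, pvTrimL]
      by_cases h : PySem.Chars.lstrip l = []
      · simp [h, PySem.Chars.join_nil, pvTrimL]
      · simp [h, PySem.Chars.join_singleton]
    | cons r0 rest' =>
      rw [PySem.Chars.join_cons_cons, List.append_assoc]
      show List.dropWhile _ _ = _
      rw [List.dropWhile_append]
      by_cases h : List.dropWhile PySem.Chars.isspace l = []
      · rw [if_pos (by simp [h])]
        rw [show (['\n'] ++ PySem.Chars.join ['\n'] (r0 :: rest') : List Char) =
          '\n' :: PySem.Chars.join ['\n'] (r0 :: rest') from rfl]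
        rw [List.dropWhile_cons, if_pos (by decide)]
        rw [show List.dropWhile PySem.Chars.isspace (PySem.Chars.join ['\n'] (r0 :: rest')) =
          PySem.Chars.lstrip (PySem.Chars.join ['\n'] (r0 :: rest')) from rfl, ih]
        conv_rhs => rw [pvTrimL]
        rw [if_pos (show PySem.Chars.lstrip l = [] from h)]
      · rw [if_neg (by simp [h])]
        rw [pvTrimL, if_neg (by exact h)]
        rw [PySem.Chars.join_cons_cons, List.append_assoc]
        rfl

lemma pv_trimR_join_ne (g : List (List Char)) (r : List Char) (rs : List (List Char))
    (h : pvTrimR g = r :: rs) : PySem.Chars.join ['\n'] (r :: rs) ≠ [] := by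
  cases rs with
  | nil =>
    rw [PySem.Chars.join_singleton]
    exact pv_trimR_single g r h
  | cons a b =>
    rw [PySem.Chars.join_cons_cons]
    simp

lemma pv_rstrip_join (g : List (List Char)) :
    PySem.Chars.rstrip (PySem.Chars.join ['\n'] g) = PySem.Chars.join ['\n'] (pvTrimR g) := by
  induction g with
  | nil => simp [PySem.Chars.join_nil, pvTrimR, PySem.Chars.rstrip]
  | cons l rest ih =>
    cases rest with
    | nil =>
      rw [PySem.Chars.join_singleton, pvTrimR]
      by_cases h : PySem.Chars.rstrip l = []
      · simp [h, PySem.Chars.join_nil, pvTrimR]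
      · simp [h, PySem.Chars.join_singleton, pvTrimR]
    | cons r0 rest' =>
      rw [PySem.Chars.join_cons_cons, List.append_assoc, pv_rstrip_append]
      cases htr : pvTrimR (r0 :: rest') with
      | nil =>
        rw [htr, PySem.Chars.join_nil] at ih
        have hinner : PySem.Chars.rstrip (['\n'] ++ PySem.Chars.join ['\n'] (r0 :: rest')) = [] := by
          rw [pv_rstrip_append, if_pos ih]
          decide
        rw [hinner, if_pos rfl, pvTrimR, htr]
        by_cases h : PySem.Chars.rstrip l = []
        · simp [h, PySem.Chars.join_nil]
        · simp [h, PySem.Chars.join_singleton]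
      | cons a b =>
        rw [htr] at ih
        have hnn := pv_trimR_join_ne (r0 :: rest') a b htr
        have hinner : PySem.Chars.rstrip (['\n'] ++ PySem.Chars.join ['\n'] (r0 :: rest')) =
            ['\n'] ++ PySem.Chars.join ['\n'] (a :: b) := by
          rw [pv_rstrip_append, if_neg (by rw [ih]; exact hnn), ih]
        rw [hinner, if_neg (by simp), pvTrimR, htr, PySem.Chars.join_cons_cons]
        simp [List.append_assoc]

lemma pv_trimL_any (dc : List Char) (hne : dc ≠ []) (g : List (List Char)) :
    (pvTrimL g).any (pvQ dc) = g.any (pvQ dc) := by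
  induction g with
  | nil => simp [pvTrimL]
  | cons l rest ih =>
    rw [pvTrimL]
    by_cases h : PySem.Chars.lstrip l = []
    · rw [if_pos h, ih]
      have hq : pvQ dc l = false := by
        unfold pvQ
        rw [h]
        exact pv_startswith_nil dc hne
      simp [hq]
    · rw [if_neg h]
      simp [pv_q_lstrip]

lemma pv_trimR_any (dc : List Char) (hne : dc ≠ [])
    (hlast : ∀ c, dc.getLast? = some c → PySem.Chars.isspace c = false) (g : List (List Char)) :
    (pvTrimR g).any (pvQ dc) = g.any (pvQ dc) := by
  induction g with
  | nil => simp [pvTrimR]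
  | cons l rest ih =>
    rw [pvTrimR]
    cases htr : pvTrimR rest with
    | nil =>
      rw [htr] at ih
      simp only [List.any_nil] at ih
      by_cases h : PySem.Chars.rstrip l = []
      · have hq : pvQ dc l = false :=
          pv_q_ws dc l hne ((pv_rstrip_nil_iff l).mp h)
        simp [h, hq, ← ih]
      · simp [h, pv_q_rstrip dc l hne hlast, ← ih]
    | cons a b =>
      rw [htr] at ih
      simp [← ih]

lemma pv_trimL_breakfree (g : List (List Char)) (hg : ∀ l ∈ g, ∀ c ∈ l, pvIsB c = false) :
    ∀ l ∈ pvTrimL g, ∀ c ∈ l, pvIsB c = false := by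
  induction g with
  | nil => simp [pvTrimL]
  | cons l rest ih =>
    rw [pvTrimL]
    by_cases h : PySem.Chars.lstrip l = []
    · rw [if_pos h]
      exact ih fun x hx => hg x (by simp [hx])
    · rw [if_neg h]
      intro l2 hl2 c hc
      rcases List.mem_cons.mp hl2 with h2 | h2
      · subst h2
        exact hg l (by simp) c ((List.dropWhile_sublist _).subset hc)
      · exact hg l2 (by simp [h2]) c hc

lemma pv_trimR_breakfree (g : List (List Char)) (hg : ∀ l ∈ g, ∀ c ∈ l, pvIsB c = false) :
    ∀ l ∈ pvTrimR g, ∀ c ∈ l, pvIsB c = false := by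
  induction g with
  | nil => simp [pvTrimR]
  | cons l rest ih =>
    intro l2 hl2 c hc
    rw [pvTrimR] at hl2
    cases htr : pvTrimR rest with
    | nil =>
      rw [htr] at hl2
      by_cases h : PySem.Chars.rstrip l = []
      · rw [if_pos h] at hl2
        simp at hl2
      · rw [if_neg h] at hl2
        have h2 := List.mem_singleton.mp hl2
        subst h2
        obtain ⟨ws, hdec, -⟩ := pv_rstrip_decomp l
        exact hg l (by simp) c (by rw [hdec]; exact List.mem_append_left _ hc)
    | cons a b =>
      rw [htr] at hl2
      rcases List.mem_cons.mp hl2 with h2 | h2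
      · exact hg l (by simp) c (by rw [← h2]; exact hc)
      · exact ih (fun x hx => hg x (by simp [hx])) l2 (by rw [htr]; exact h2) c hc

-- ---------- splitlines of a "\n"-join of break-free lines ----------

lemma pv_SLc_single (l : List Char) (hl : ∀ c ∈ l, pvIsB c = false) :
    pvSLc l = if l = [] then [] else [l] := by
  induction l with
  | nil => simp [pvSLc]
  | cons a r ih =>
    have ha : pvIsB a = false := hl a (by simp)
    have hp : ¬(a = '\r' ∧ r.head? = some '\n') := by
      rintro ⟨h1, -⟩
      subst h1
      exact absurd ha (by decide)
    rw [pvSLc_cons a r hp, if_neg (by simp [ha]), ih (fun c hc => hl c (by simp [hc]))]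
    by_cases h : r = []
    · simp [h]
    · simp [h]

lemma pv_SLc_append (l r : List Char) (hl : ∀ c ∈ l, pvIsB c = false) :
    pvSLc (l ++ '\n' :: r) = l :: pvSLc r := by
  induction l with
  | nil =>
    show pvSLc ('\n' :: r) = [] :: pvSLc r
    rw [pvSLc_cons '\n' r (by rintro ⟨h1, -⟩; exact absurd h1 (by decide)), if_pos (by decide)]
  | cons a t ih =>
    have ha : pvIsB a = false := hl a (by simp)
    have hp : ¬(a = '\r' ∧ (t ++ '\n' :: r).head? = some '\n') := by
      rintro ⟨h1, -⟩
      subst h1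
      exact absurd ha (by decide)
    show pvSLc (a :: (t ++ '\n' :: r)) = (a :: t) :: pvSLc r
    rw [pvSLc_cons _ _ hp, if_neg (by simp [ha]), ih (fun c hc => hl c (by simp [hc]))]

lemma pv_SLc_join_any (dc : List Char) (hne : dc ≠ []) (g : List (List Char))
    (hg : ∀ l ∈ g, ∀ c ∈ l, pvIsB c = false) :
    (pvSLc (PySem.Chars.join ['\n'] g)).any (pvQ dc) = g.any (pvQ dc) := by
  induction g with
  | nil => simp [PySem.Chars.join_nil, pvSLc]
  | cons l rest ih =>
    cases rest with
    | nil =>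
      rw [PySem.Chars.join_singleton, pv_SLc_single l (hg l (by simp))]
      by_cases h : l = []
      · simp [h, pv_q_nil dc hne]
      · simp [h]
    | cons r0 rest' =>
      rw [PySem.Chars.join_cons_cons, List.append_assoc]
      rw [show (['\n'] ++ PySem.Chars.join ['\n'] (r0 :: rest') : List Char) =
        '\n' :: PySem.Chars.join ['\n'] (r0 :: rest') from rfl]
      rw [pv_SLc_append _ _ (hg l (by simp))]
      simp only [List.any_cons]
      rw [ih (fun x hx => hg x (by simp [hx]))]
      simp

lemma pv_keychunk (dc : List Char) (hne : dc ≠ [])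
    (hlast : ∀ c, dc.getLast? = some c → PySem.Chars.isspace c = false)
    (g : List (List Char)) (hg : ∀ l ∈ g, ∀ c ∈ l, pvIsB c = false) :
    (pvSLc (PySem.Chars.strip (PySem.Chars.join ['\n'] g))).any (pvQ dc) = g.any (pvQ dc) := by
  have h1 : PySem.Chars.strip (PySem.Chars.join ['\n'] g) =
      PySem.Chars.join ['\n'] (pvTrimR (pvTrimL g)) := by
    show PySem.Chars.rstrip (PySem.Chars.lstrip _) = _
    rw [pv_lstrip_join, pv_rstrip_join]
  rw [h1, pv_SLc_join_any dc hne _ (pv_trimR_breakfree _ (pv_trimL_breakfree g hg)),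
    pv_trimR_any dc hne hlast, pv_trimL_any dc hne]

-- ---------- String-level machinery ----------

def pvFlushS (g : List String) : List String :=
  let b := PySem.Str.strip (PySem.Str.join "\n" g)
  if b ≠ "" then [b] else []

def pvAA (nd c : String) : Bool :=
  (PySem.Str.splitlines c).any fun line =>
    PySem.Str.startswith (PySem.Str.lstrip line) nd

def pvGoodD (nd : String) : Prop :=
  nd.toList ≠ [] ∧ nd.toList.getLast?.all (fun c => !PySem.Chars.isspace c) = true

lemma pv_goodD_last (nd : String) (hd : pvGoodD nd) :
    ∀ c, nd.toList.getLast? = some c → PySem.Chars.isspace c = false := by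
  intro c hc
  have h2 := hd.2
  rw [hc] at h2
  simpa using h2

lemma pv_goodD_nd (x : String) :
    pvGoodD (if PySem.Str.strip x = "" then "###" else PySem.Str.strip x) := by
  by_cases h : PySem.Str.strip x = ""
  · rw [if_pos h]
    exact ⟨by decide, by decide⟩
  · rw [if_neg h]
    constructor
    · intro hc
      apply h
      have h2 := congrArg String.ofList hc
      rw [String.ofList_toList] at h2
      exact h2
    · have ht : (PySem.Str.strip x).toList =
          (List.dropWhile PySem.Chars.isspace (PySem.Chars.lstrip x.toList).reverse).reverse := by
        show (String.ofList (PySem.Chars.strip x.toList)).toList = _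
        rw [String.toList_ofList]
        rfl
      rw [ht, List.getLast?_reverse]
      cases hopt : (List.dropWhile PySem.Chars.isspace (PySem.Chars.lstrip x.toList).reverse).head? with
      | none => rfl
      | some c =>
        have hne2 : List.dropWhile PySem.Chars.isspace (PySem.Chars.lstrip x.toList).reverse ≠ [] := by
          intro hz
          rw [hz] at hopt
          simp at hopt
        have hh := List.head_dropWhile_not PySem.Chars.isspace hne2
        rw [List.head?_eq_head hne2] at hopt
        injection hopt with h2
        rw [← h2]
        simp [hh]

lemma pv_flushS_nil : pvFlushS [] = [] := by
  have h : PySem.Str.strip (PySem.Str.join "\n" []) = "" := by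
    show String.ofList (PySem.Chars.strip (String.ofList
      (PySem.Chars.join "\n".toList (List.map String.toList ([] : List String)))).toList) = ""
    rw [String.toList_ofList]
    rfl
  simp [pvFlushS, h]

lemma pv_flushA_eq (cs cur : List String) : pvFlushA cs cur = cs ++ pvFlushS cur := by
  cases cur with
  | nil => simp [pvFlushA, pv_flushS_nil]
  | cons a t =>
    by_cases hb : PySem.Str.strip (PySem.Str.join "\n" (a :: t)) = ""
    · simp [pvFlushA, pvFlushS, hb]
    · simp [pvFlushA, pvFlushS, hb]

lemma pv_p_eq_q (nd : String) (hd : pvGoodD nd) (l : String) :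
    PySem.Str.startswith (PySem.Str.strip l) nd = pvQ nd.toList l.toList := by
  rw [PySem.Str.startswith_eq]
  have ht : (PySem.Str.strip l).toList = PySem.Chars.strip l.toList := by
    show (String.ofList _).toList = _
    rw [String.toList_ofList]
  rw [ht]
  exact pv_strip_q nd.toList l.toList hd.1 (pv_goodD_last nd hd)

lemma pv_flush_any (nd : String) (hd : pvGoodD nd) (g : List String)
    (hg : ∀ l ∈ g, ∀ c ∈ l.toList, pvIsB c = false) :
    (pvFlushS g).any (pvAA nd) = g.any fun l => pvQ nd.toList l.toList := by
  have hAA : ∀ c : String, pvAA nd c = (pvSLc c.toList).any (pvQ nd.toList) := by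
    intro c
    unfold pvAA
    rw [show PySem.Str.splitlines c = (PySem.Chars.splitlines c.toList).map String.ofList from rfl]
    rw [List.any_map, pv_splitlines_eq]
    rw [show ((fun line => PySem.Str.startswith (PySem.Str.lstrip line) nd) ∘ String.ofList) =
        pvQ nd.toList from by
      funext lc
      show PySem.Str.startswith (PySem.Str.lstrip (String.ofList lc)) nd = pvQ nd.toList lc
      rw [PySem.Str.startswith_eq]
      show PySem.Chars.startswith
        ((String.ofList (PySem.Chars.lstrip (String.ofList lc).toList)).toList) nd.toList = _
      rw [String.toList_ofList, String.toList_ofList]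
      rfl]
  have hbt : (PySem.Str.strip (PySem.Str.join "\n" g)).toList =
      PySem.Chars.strip (PySem.Chars.join ['\n'] (g.map String.toList)) := by
    show (String.ofList (PySem.Chars.strip (String.ofList
      (PySem.Chars.join "\n".toList (List.map String.toList g))).toList)).toList = _
    rw [String.toList_ofList, String.toList_ofList]
    rfl
  have hbf : ∀ lc ∈ g.map String.toList, ∀ c ∈ lc, pvIsB c = false := by
    intro lc hlc c hc
    obtain ⟨l, hl, rfl⟩ := List.mem_map.mp hlc
    exact hg l hl c hc
  have hkey := pv_keychunk nd.toList hd.1 (pv_goodD_last nd hd) (g.map String.toList) hbf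
  have hr : (g.any fun l => pvQ nd.toList l.toList) = (g.map String.toList).any (pvQ nd.toList) := by
    rw [List.any_map]
    rfl
  unfold pvFlushS
  by_cases hb : PySem.Str.strip (PySem.Str.join "\n" g) = ""
  · rw [if_neg (by simp [hb])]
    simp only [List.any_nil]
    rw [hr, ← hkey, ← hbt, hb]
    rfl
  · rw [if_pos hb]
    simp only [List.any_cons, List.any_nil, Bool.or_false]
    rw [hAA _, hbt, hkey, ← hr]

-- ---------- the common segment decomposition ----------

def pvSplit (nd : String) : List String → List String × List (List String)
  | [] => ([], [])
  | l :: rest =>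
    let so := pvSplit nd rest
    if PySem.Str.startswith (PySem.Str.strip l) nd then ([], (l :: so.1) :: so.2)
    else (l :: so.1, so.2)

lemma pv_split_join (nd : String) : ∀ ls : List String,
    (pvSplit nd ls).1 ++ (pvSplit nd ls).2.flatten = ls := by
  intro ls
  induction ls with
  | nil => simp [pvSplit]
  | cons l rest ih =>
    by_cases h : PySem.Str.startswith (PySem.Str.strip l) nd
    · simp only [pvSplit, h, if_true]
      simp [ih]
    · simp only [pvSplit, h, if_false, Bool.false_eq_true]
      simp [ih]

lemma pv_split_seg (nd : String) : ∀ ls : List String, ∀ l ∈ (pvSplit nd ls).1,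
    PySem.Str.startswith (PySem.Str.strip l) nd = false := by
  intro ls
  induction ls with
  | nil => simp [pvSplit]
  | cons l rest ih =>
    intro x hx
    by_cases h : PySem.Str.startswith (PySem.Str.strip l) nd
    · simp only [pvSplit, h, if_true] at hx
      simp at hx
    · simp only [pvSplit, h, if_false, Bool.false_eq_true] at hx
      rcases List.mem_cons.mp hx with h2 | h2
      · rw [h2]
        simpa using h
      · exact ih x h2

lemma pv_split_out (nd : String) : ∀ ls : List String, ∀ g ∈ (pvSplit nd ls).2,
    ∃ h t, g = h :: t ∧ PySem.Str.startswith (PySem.Str.strip h) nd = true := by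
  intro ls
  induction ls with
  | nil => simp [pvSplit]
  | cons l rest ih =>
    intro g hgm
    by_cases h : PySem.Str.startswith (PySem.Str.strip l) nd
    · simp only [pvSplit, h, if_true] at hgm
      rcases List.mem_cons.mp hgm with h2 | h2
      · exact ⟨l, (pvSplit nd rest).1, h2, h⟩
      · exact ih g h2
    · simp only [pvSplit, h, if_false, Bool.false_eq_true] at hgm
      exact ih g hgm

-- ---------- A-side: the fold computes the segment chunks ----------

lemma pv_foldA (nd : String) : ∀ (ls : List String) (cs cur : List String),
    pvFlushA (ls.foldl (pvStepA nd) (cs, cur)).1 (ls.foldl (pvStepA nd) (cs, cur)).2 =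
      cs ++ pvFlushS (cur ++ (pvSplit nd ls).1) ++ ((pvSplit nd ls).2.flatMap pvFlushS) := by
  intro ls
  induction ls with
  | nil =>
    intro cs cur
    simp [pvSplit, pv_flushA_eq]
  | cons l rest ih =>
    intro cs cur
    rw [List.foldl_cons]
    by_cases h : PySem.Str.startswith (PySem.Str.strip l) nd
    · rw [show pvStepA nd (cs, cur) l = (pvFlushA cs cur, [l]) from by unfold pvStepA; rw [if_pos h]]
      rw [ih (pvFlushA cs cur) [l], pv_flushA_eq]
      rw [show pvSplit nd (l :: rest) =
        ([], (l :: (pvSplit nd rest).1) :: (pvSplit nd rest).2) from by simp only [pvSplit]; rw [if_pos h]]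
      simp [List.append_assoc]
    · rw [show pvStepA nd (cs, cur) l = (cs, cur ++ [l]) from by unfold pvStepA; rw [if_neg h]]
      rw [ih cs (cur ++ [l])]
      rw [show pvSplit nd (l :: rest) =
        (l :: (pvSplit nd rest).1, (pvSplit nd rest).2) from by simp only [pvSplit]; rw [if_neg h]]
      simp [List.append_assoc]

-- ---------- B-side: indices, bounds, slices ----------

def pvStartsN : Nat → List (List String) → List Nat
  | _, [] => []
  | a, g :: o => a :: pvStartsN (a + g.length) o

def pvBoundsN : Nat → List (List String) → List Nat
  | a, [] => [a]
  | a, g :: o => a :: pvBoundsN (a + g.length) o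

lemma pv_boundsN_eq : ∀ (segs : List (List String)) (a : Nat),
    pvBoundsN a segs = pvStartsN a segs ++ [a + segs.flatten.length] := by
  intro segs
  induction segs with
  | nil => intro a; simp [pvBoundsN, pvStartsN]
  | cons g o ih =>
    intro a
    simp only [pvBoundsN, pvStartsN, ih (a + g.length)]
    simp [List.length_append, Nat.add_assoc]

lemma pv_enum (nd : String) : ∀ (ls : List String) (k : Nat),
    ((PySem.List.enumerate ls (k : Int)).filterMap fun il =>
        if PySem.Str.startswith (PySem.Str.strip il.2) nd then some il.1 else none) =
      (pvStartsN (k + (pvSplit nd ls).1.length) (pvSplit nd ls).2).map (Nat.cast : Nat → Int) := by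
  intro ls
  induction ls with
  | nil => intro k; simp [PySem.List.enumerate, pvSplit, pvStartsN]
  | cons l rest ih =>
    intro k
    rw [show PySem.List.enumerate (l :: rest) (k : Int) =
      ((k : Int), l) :: PySem.List.enumerate rest ((k : Int) + 1) from by
        simp [PySem.List.enumerate]]
    rw [List.filterMap_cons]
    by_cases h : PySem.Str.startswith (PySem.Str.strip l) nd
    · simp only [h, if_true]
      rw [show ((k : Int) + 1) = ((k + 1 : Nat) : Int) from by push_cast; ring]
      rw [ih (k + 1)]
      rw [show pvSplit nd (l :: rest) =
        ([], (l :: (pvSplit nd rest).1) :: (pvSplit nd rest).2) from by simp only [pvSplit]; rw [if_pos h]]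
      simp only [List.length_nil, Nat.add_zero, pvStartsN, List.length_cons, List.map_cons]
      rw [show k + 1 + (pvSplit nd rest).1.length = k + ((pvSplit nd rest).1.length + 1) from by
        omega]
    · simp only [h, if_false, Bool.false_eq_true]
      rw [show ((k : Int) + 1) = ((k + 1 : Nat) : Int) from by push_cast; ring]
      rw [ih (k + 1)]
      rw [show pvSplit nd (l :: rest) =
        (l :: (pvSplit nd rest).1, (pvSplit nd rest).2) from by simp only [pvSplit]; rw [if_neg h]]
      simp only [List.length_cons]
      rw [show k + 1 + (pvSplit nd rest).1.length = k + ((pvSplit nd rest).1.length + 1) from by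
        omega]

lemma pv_cum (ls : List String) : ∀ (segs : List (List String)) (a : Nat) (acc : List String),
    ls.drop a = segs.flatten →
    ((pvBoundsN a segs).zip (pvBoundsN a segs).tail).foldl (fun chunks se =>
        let block := PySem.Str.strip (PySem.Str.join "\n"
          (PySem.List.slice ls (some (se.1 : Int)) (some (se.2 : Int))))
        if block ≠ "" then chunks ++ [block] else chunks) acc = acc ++ segs.flatMap pvFlushS := by
  intro segs
  induction segs with
  | nil =>
    intro a acc h
    simp [pvBoundsN]
  | cons g o ih =>
    intro a acc h
    have hhead : ∃ t, pvBoundsN (a + g.length) o = (a + g.length) :: t := by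
      cases o with
      | nil => exact ⟨[], rfl⟩
      | cons g2 o2 => exact ⟨_, rfl⟩
    obtain ⟨t, ht⟩ := hhead
    rw [show pvBoundsN a (g :: o) = a :: pvBoundsN (a + g.length) o from rfl, ht]
    simp only [List.tail_cons, List.zip_cons_cons, List.foldl_cons]
    have hsl : PySem.List.slice ls (some (a : Int)) (some ((a + g.length : Nat) : Int)) = g := by
      rw [PySem.List.slice_natCast, h, List.flatten_cons]
      rw [show a + g.length - a = g.length from by omega]
      exact List.take_left
    have hstep : (let block := PySem.Str.strip (PySem.Str.join "\n"
        (PySem.List.slice ls (some ((a, a + g.length).1 : Int)) (some ((a, a + g.length).2 : Int))))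
        if block ≠ "" then acc ++ [block] else acc) = acc ++ pvFlushS g := by
      show (let block := PySem.Str.strip (PySem.Str.join "\n"
        (PySem.List.slice ls (some (a : Int)) (some ((a + g.length : Nat) : Int))))
        if block ≠ "" then acc ++ [block] else acc) = acc ++ pvFlushS g
      rw [hsl]
      unfold pvFlushS
      by_cases hb : PySem.Str.strip (PySem.Str.join "\n" g) = ""
      · simp [hb]
      · simp [hb]
    rw [hstep]
    have h2 : ls.drop (a + g.length) = o.flatten := by
      rw [← List.drop_drop, h, List.flatten_cons, List.drop_left]
    have hih := ih (a + g.length) (acc ++ pvFlushS g) h2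
    rw [ht] at hih
    simp only [List.tail_cons] at hih
    rw [hih]
    simp [List.flatMap_cons, List.append_assoc]

-- ---------- final assembly ----------

theorem pv_core (markdown_text delimiter : String) :
    chunk_markdown_by_delimiter markdown_text delimiter =
      chunk_markdown_by_delimiter_alt markdown_text delimiter := by
  by_cases hguard : markdown_text = "" ∨ PySem.Str.strip markdown_text = ""
  · unfold chunk_markdown_by_delimiter chunk_markdown_by_delimiter_alt
    rw [if_pos hguard, if_pos hguard]
  · unfold chunk_markdown_by_delimiter chunk_markdown_by_delimiter_alt
    rw [if_neg hguard, if_neg hguard]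
    dsimp only
    set nd := (if PySem.Str.strip (if delimiter = "" then "###" else delimiter) = "" then "###"
      else PySem.Str.strip (if delimiter = "" then "###" else delimiter)) with hnd
    set lines := PySem.Str.splitlines markdown_text with hlines
    have hd : pvGoodD nd := hnd ▸ pv_goodD_nd (if delimiter = "" then "###" else delimiter)
    have hbf : ∀ l ∈ lines, ∀ c ∈ l.toList, pvIsB c = false := by
      intro l hl c hc
      rw [hlines, show PySem.Str.splitlines markdown_text =
        (PySem.Chars.splitlines markdown_text.toList).map String.ofList from rfl] at hl
      obtain ⟨lc, hlc, rfl⟩ := List.mem_map.mp hl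
      rw [String.toList_ofList] at hc
      rw [pv_splitlines_eq] at hlc
      exact pv_SLc_breakfree _ lc hlc c hc
    obtain ⟨seg, out, hso⟩ : ∃ seg out, pvSplit nd lines = (seg, out) := ⟨_, _, rfl⟩
    have hjoin : seg ++ out.flatten = lines := by
      have h1 := pv_split_join nd lines
      rw [hso] at h1
      exact h1
    have hchunks : pvFlushA (List.foldl (pvStepA nd) ([], []) lines).1
        (List.foldl (pvStepA nd) ([], []) lines).2 = pvFlushS seg ++ out.flatMap pvFlushS := by
      rw [pv_foldA nd lines [] [], hso]
      simp
    have hmemseg : ∀ l ∈ seg, l ∈ lines := fun l hl => by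
      rw [← hjoin]; exact List.mem_append_left _ hl
    have hidx : ((PySem.List.enumerate lines 0).filterMap fun il =>
        if PySem.Str.startswith (PySem.Str.strip il.2) nd then some il.1 else none) =
        (pvStartsN seg.length out).map (Nat.cast : Nat → Int) := by
      have h0 := pv_enum nd lines 0
      rw [hso] at h0
      simpa using h0
    rw [hchunks]
    rw [show (fun chunk => (PySem.Str.splitlines chunk).any fun line =>
      PySem.Str.startswith (PySem.Str.lstrip line) nd) = pvAA nd from rfl]
    rw [hidx]
    cases out with
    | nil =>
      have hany : (pvFlushS seg ++ List.flatMap pvFlushS []).any (pvAA nd) = false := by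
        simp only [List.flatMap_nil, List.append_nil]
        rw [pv_flush_any nd hd seg (fun l hl => hbf l (hmemseg l hl))]
        rw [List.any_eq_false]
        intro l hl
        have h1 := pv_split_seg nd lines
        rw [hso] at h1
        rw [← pv_p_eq_q nd hd l, h1 l hl]
        simp
      rw [hany]
      simp [pvStartsN]
    | cons g0 out' =>
      obtain ⟨h0, t0, hg0eq, hp0⟩ : ∃ h t, g0 = h :: t ∧
          PySem.Str.startswith (PySem.Str.strip h) nd = true := by
        have h1 := pv_split_out nd lines
        rw [hso] at h1
        exact h1 g0 (List.mem_cons_self ..)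
      have hmemflat : ∀ l ∈ (g0 :: out').flatten, l ∈ lines := fun l hl => by
        rw [← hjoin]; exact List.mem_append_right _ hl
      have hany : (pvFlushS seg ++ List.flatMap pvFlushS (g0 :: out')).any (pvAA nd) = true := by
        rw [List.any_append]
        have hr : (List.flatMap pvFlushS (g0 :: out')).any (pvAA nd) = true := by
          rw [List.any_flatMap]
          apply List.any_eq_true.mpr
          refine ⟨g0, List.mem_cons_self .., ?_⟩
          rw [pv_flush_any nd hd g0 (fun l hl => hbf l (hmemflat l
            (List.mem_flatten.mpr ⟨g0, List.mem_cons_self .., hl⟩)))]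
          apply List.any_eq_true.mpr
          refine ⟨h0, by rw [hg0eq]; simp, ?_⟩
          rw [pv_p_eq_q nd hd h0] at hp0
          exact hp0
        rw [hr, Bool.or_true]
      rw [hany, if_pos rfl]
      rw [if_neg (by simp [pvStartsN])]
      have hlen : lines.length = seg.length + (g0 :: out').flatten.length := by
        rw [← hjoin, List.length_append]
      have hb2 : ((0 : Int) :: (pvStartsN seg.length (g0 :: out')).map (Nat.cast : Nat → Int)) ++
          [(lines.length : Int)] = (pvBoundsN 0 (seg :: g0 :: out')).map (Nat.cast : Nat → Int) := by
        rw [pv_boundsN_eq]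
        rw [show pvStartsN 0 (seg :: g0 :: out') =
          0 :: pvStartsN (0 + seg.length) (g0 :: out') from rfl]
        simp [hlen, List.flatten_cons, List.length_append]
      rw [hb2]
      have hzip : (((pvBoundsN 0 (seg :: g0 :: out')).map (Nat.cast : Nat → Int)).zip
          ((pvBoundsN 0 (seg :: g0 :: out')).map (Nat.cast : Nat → Int)).tail) =
          ((pvBoundsN 0 (seg :: g0 :: out')).zip (pvBoundsN 0 (seg :: g0 :: out')).tail).map
            (Prod.map (Nat.cast : Nat → Int) (Nat.cast : Nat → Int)) := by
        rw [← List.map_tail, List.zip_map]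
      rw [hzip, List.foldl_map]
      have hcum := pv_cum lines (seg :: g0 :: out') 0 []
        (by simp [List.flatten_cons, ← hjoin])
      rw [List.flatMap_cons] at hcum
      simp only [List.nil_append] at hcum
      exact hcum.symm


-- ===== VERDICT (by name: the statement is the Claim_ definition above) =====
theorem chunk_markdown_by_delimiter_spec : Claim_equal_chunk_markdown_by_delimiter := by
  intro markdown_text delimiter _
  unfold Spec_chunk_markdown_by_delimiter
  exact pv_core markdown_text delimiter
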